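-- pv_equiv track=rewrite | github.com/Independent-AI-Labs/AMI-ORCHESTRATOR | scripts/fix_pattern_numbering.py | _remove_numbering
-- ===== SOURCE A (Python) =====
-- def _remove_numbering(
--     lines: list[str],
--     section_patterns: dict[str, list[tuple[int, str]]],
--     section_header_lines: dict[str, int],
-- ) -> list[str]:
--     """Remove pattern numbers and section counts."""
--     new_lines = lines.copy()
--
--     for section, patterns in section_patterns.items():
--         # Remove count from section header
--         header_line = section_header_lines[section]
--         new_lines[header_line] = f"### {section} SEVERITY\n"
--
--         # Remove numbers from pattern headers
--         for line_num, title in patterns: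
--             new_lines[line_num] = f"#### {title}\n"
--
--     return new_lines
-- ===== SOURCE B (Python) =====
-- def _remove_numbering(
--     lines: list[str],
--     section_patterns: dict[str, list[tuple[int, str]]],
--     section_header_lines: dict[str, int],
-- ) -> list[str]:
--     """Remove pattern numbers and section counts.
--
--     Staged pipeline: stream out every (line number, replacement text) edit,
--     collapse the stream into a table (last write wins), sort the edits by
--     line number, then rebuild the file in one forward merge sweep.
--     """
--
--     def edit_stream():
--         for section, patterns in section_patterns.items():
--             yield section_header_lines[section], f"### {section} SEVERITY\n"
--             for line_num, title in patterns:
--                 yield line_num, f"#### {title}\n"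
--
--     edits = sorted(dict(edit_stream()).items(), key=lambda e: e[0])
--     out: list[str] = []
--     j = 0
--     for i, line in enumerate(lines):
--         while j < len(edits) and edits[j][0] < i:
--             j += 1
--         if j < len(edits) and edits[j][0] == i:
--             out.append(edits[j][1])
--             j += 1
--         else:
--             out.append(line)
--     return out
-- ===== Notes on version B (the rewrite author's own statement) =====
-- stated objective: alternative
-- what changed: B replaces A's copy-then-scattered in-place index assignments with a staged pipeline: flatten all sections into one line->replacement table, sort the edits by line number, then rebuild the file in a single forward merge sweep of the sorted edits with the lines.
-- intended difference: On inputs where some section header or pattern line number is negative, A wraps it Python-style and overwrites a line counted from the end of the file, while B's forward merge never reaches a negative line number and leaves those lines unchanged; line numbers here are 0-based file positions, so not silently rewriting an unrelated line near the end of the file is the intended behaviour. — e.g. on _remove_numbering(["a\n", "b\n"], [("HIGH", [(-1, "T")])], [("HIGH", 0)]): A returns ["### HIGH SEVERITY\n", "#### T\n"], B returns ["### HIGH SEVERITY\n", "b\n"]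
import Mathlib
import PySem

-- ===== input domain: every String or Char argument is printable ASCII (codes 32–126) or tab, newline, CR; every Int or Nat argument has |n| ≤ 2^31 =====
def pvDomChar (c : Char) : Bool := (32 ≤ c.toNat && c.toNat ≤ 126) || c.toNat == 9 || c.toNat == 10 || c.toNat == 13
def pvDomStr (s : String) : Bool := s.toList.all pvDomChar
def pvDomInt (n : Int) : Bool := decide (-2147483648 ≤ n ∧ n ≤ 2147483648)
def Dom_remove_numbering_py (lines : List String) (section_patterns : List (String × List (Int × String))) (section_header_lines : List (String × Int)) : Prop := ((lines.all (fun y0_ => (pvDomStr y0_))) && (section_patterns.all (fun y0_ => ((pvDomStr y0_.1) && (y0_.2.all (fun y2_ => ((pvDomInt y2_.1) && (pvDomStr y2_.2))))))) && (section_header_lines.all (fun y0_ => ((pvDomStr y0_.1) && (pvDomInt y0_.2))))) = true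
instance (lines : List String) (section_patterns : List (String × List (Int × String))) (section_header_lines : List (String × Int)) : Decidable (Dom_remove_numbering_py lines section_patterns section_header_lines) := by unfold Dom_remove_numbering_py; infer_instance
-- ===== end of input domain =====

-- B rebuilds the file by flattening the sections into one replacement table, sorting the
-- edits by line number and merging them with the lines in one forward sweep (objective:
-- alternative); on negative line numbers B intentionally differs from A (see D_ below).

-- ===== PORT A =====
-- A: copy the lines, then for each section overwrite the header line and each pattern line in place.
def remove_numbering_py (lines : List String) (section_patterns : List (String × List (Int × String))) (section_header_lines : List (String × Int)) : List String :=
  section_patterns.foldl (fun new_lines sec =>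
    match (PySem.Dict.mk section_header_lines).get? sec.1 with
    | none => new_lines   -- KeyError in Python; excluded by Pre_
    | some header_line =>
      sec.2.foldl (fun nl p => PySem.List.pySetD nl p.1 ("#### " ++ p.2 ++ "\n"))
        (PySem.List.pySetD new_lines header_line ("### " ++ sec.1 ++ " SEVERITY\n"))) lines

-- ===== PORT B =====
-- B's merge sweep: walk the lines with an index, skipping sorted edits that lie behind the
-- index and emitting the edit text when its line number matches (the for-loop with pointer j).
def pvMergeEdits : Int → List (Int × String) → List String → List String
  | _, _, [] => []
  | i, es, l :: ls =>
    match es.dropWhile (fun e => decide (e.1 < i)) with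
    | [] => l :: pvMergeEdits (i + 1) [] ls
    | (p, t) :: rest =>
      if p = i then t :: pvMergeEdits (i + 1) rest ls
      else l :: pvMergeEdits (i + 1) ((p, t) :: rest) ls

-- B's edit stream: one (line number, replacement text) pair per header and per pattern.
def pvEditStream (section_patterns : List (String × List (Int × String))) (section_header_lines : List (String × Int)) : List (Int × String) :=
  section_patterns.flatMap (fun sec =>
    match (PySem.Dict.mk section_header_lines).get? sec.1 with
    | none => []   -- KeyError in Python B too; excluded by Pre_
    | some h =>
      (h, "### " ++ sec.1 ++ " SEVERITY\n")
        :: sec.2.map (fun p => (p.1, "#### " ++ p.2 ++ "\n")))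

-- B: collapse the edit stream into a table (dict(...): last write wins), sort the edits
-- by line number, then merge them with the lines in one forward sweep.
def remove_numbering_py_alt (lines : List String) (section_patterns : List (String × List (Int × String))) (section_header_lines : List (String × Int)) : List String :=
  let edits := PySem.List.sorted
    (PySem.Dict.ofList (pvEditStream section_patterns section_header_lines)).items
    (fun e => e.1) false
  pvMergeEdits 0 edits lines

-- ===== PRECONDITION & SPEC =====
-- Pre_ excludes exactly the inputs on which Python A raises: a section of section_patterns
-- missing from section_header_lines (KeyError) or a header/pattern line index outside
-- [-len(lines), len(lines)) (IndexError).
def Pre_remove_numbering_py (lines : List String) (section_patterns : List (String × List (Int × String))) (section_header_lines : List (String × Int)) : Prop :=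
  ∀ sec ∈ section_patterns,
    ((PySem.Dict.mk section_header_lines).contains sec.1 = true
      ∧ PySem.Raise.InRange lines.length ((PySem.Dict.mk section_header_lines).getD sec.1 0))
    ∧ ∀ p ∈ sec.2, PySem.Raise.InRange lines.length p.1
instance (lines : List String) (section_patterns : List (String × List (Int × String))) (section_header_lines : List (String × Int)) : Decidable (Pre_remove_numbering_py lines section_patterns section_header_lines) := by
  unfold Pre_remove_numbering_py PySem.Raise.InRange; infer_instance

def pvWitness_remove_numbering_py : List String × (List (String × List (Int × String))) × (List (String × Int)) :=
  (["a\n", "b\n", "c\n"], [("HIGH", [(1, "T1")])], [("HIGH", 0)])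

-- On inputs where some section header or pattern line number is negative, A wraps it
-- Python-style and overwrites a line counted from the end of the file, while B's forward
-- merge never reaches a negative line number and leaves those lines unchanged; line numbers
-- here are 0-based file positions, so not silently rewriting an unrelated line near the end
-- of the file is the intended behaviour.
def D_remove_numbering_py (lines : List String) (section_patterns : List (String × List (Int × String))) (section_header_lines : List (String × Int)) : Prop :=
  ∃ sec ∈ section_patterns,
    (PySem.Dict.mk section_header_lines).getD sec.1 0 < 0 ∨ ∃ p ∈ sec.2, p.1 < 0
instance (lines : List String) (section_patterns : List (String × List (Int × String))) (section_header_lines : List (String × Int)) : Decidable (D_remove_numbering_py lines section_patterns section_header_lines) := by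
  unfold D_remove_numbering_py; infer_instance

def Spec_remove_numbering_py (lines : List String) (section_patterns : List (String × List (Int × String))) (section_header_lines : List (String × Int)) (out : List String) : Prop := ¬ D_remove_numbering_py lines section_patterns section_header_lines → out = remove_numbering_py_alt lines section_patterns section_header_lines
instance (lines : List String) (section_patterns : List (String × List (Int × String))) (section_header_lines : List (String × Int)) (out : List String) : Decidable (Spec_remove_numbering_py lines section_patterns section_header_lines out) := by unfold Spec_remove_numbering_py; infer_instance

def pvDiffWitness_remove_numbering_py : List String × (List (String × List (Int × String))) × (List (String × Int)) :=
  (["a\n", "b\n"], [("HIGH", [(-1, "T")])], [("HIGH", 0)])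

def pvDiffWitnessOut_remove_numbering_py : (List String) × (List String) :=
  (["### HIGH SEVERITY\n", "#### T\n"], ["### HIGH SEVERITY\n", "b\n"])

-- ===== CLAIM (what is proved, stated in full; the proofs are below) =====
def Claim_unchanged_remove_numbering_py : Prop := ∀ (lines : List String) (section_patterns : List (String × List (Int × String))) (section_header_lines : List (String × Int)), Dom_remove_numbering_py lines section_patterns section_header_lines → Pre_remove_numbering_py lines section_patterns section_header_lines → Spec_remove_numbering_py lines section_patterns section_header_lines (remove_numbering_py lines section_patterns section_header_lines)

def Claim_changed_remove_numbering_py : Prop := Dom_remove_numbering_py (pvDiffWitness_remove_numbering_py.1) (pvDiffWitness_remove_numbering_py.2.1) (pvDiffWitness_remove_numbering_py.2.2) ∧ Pre_remove_numbering_py (pvDiffWitness_remove_numbering_py.1) (pvDiffWitness_remove_numbering_py.2.1) (pvDiffWitness_remove_numbering_py.2.2) ∧ D_remove_numbering_py (pvDiffWitness_remove_numbering_py.1) (pvDiffWitness_remove_numbering_py.2.1) (pvDiffWitness_remove_numbering_py.2.2) ∧ remove_numbering_py (pvDiffWitness_remove_numbering_py.1) (pvDiffWitness_remove_numbering_py.2.1)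 (pvDiffWitness_remove_numbering_py.2.2) = pvDiffWitnessOut_remove_numbering_py.1 ∧ remove_numbering_py_alt (pvDiffWitness_remove_numbering_py.1) (pvDiffWitness_remove_numbering_py.2.1) (pvDiffWitness_remove_numbering_py.2.2) = pvDiffWitnessOut_remove_numbering_py.2 ∧ pvDiffWitnessOut_remove_numbering_py.1 ≠ pvDiffWitnessOut_remove_numbering_py.2

-- ===== LEMMAS AND PROOFS =====

-- A's scattered writes, abstracted: apply a lookup table to every (index, line) pair.
def pvApply (d : PySem.Dict Int String) (s : List String) : List String :=
  (PySem.List.enumerate s 0).map (fun p => d.getD p.1 p.2)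

-- first-match association lookup, the shape pvMergeEdits consumes the sorted edits in
def pvLkp : List (Int × String) → Int → Option String
  | [], _ => none
  | (k, v) :: r, q => if k = q then some v else pvLkp r q

theorem pvApply_length (d : PySem.Dict Int String) (s : List String) :
    (pvApply d s).length = s.length := by
  simp [pvApply, PySem.List.length_enumerate]

theorem pvApply_empty (s : List String) : pvApply PySem.Dict.empty s = s := by
  apply List.ext_getElem
  · exact pvApply_length _ _
  · intro j h1 h2
    simp [pvApply, PySem.Dict.getD_empty]

theorem pvApply_insert (d : PySem.Dict Int String) (s : List String) (i : Int)
    (h0 : 0 ≤ i) (h1 : i < (s.length : Int)) (v : String) :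
    pvApply (d.insert i v) s = (pvApply d s).set i.toNat v := by
  apply List.ext_getElem
  · simp [pvApply_length]
  · intro j hj1 hj2
    have hj : j < s.length := by simpa [pvApply_length] using hj1
    simp only [pvApply, List.getElem_map, PySem.List.getElem_enumerate,
      PySem.Dict.getD_insert, List.getElem_set]
    split_ifs with a b <;> first | rfl | omega

theorem pv_inner (s : List String) (pats : List (Int × String)) (d : PySem.Dict Int String)
    (hp : ∀ p ∈ pats, 0 ≤ p.1 ∧ p.1 < (s.length : Int)) :
    pats.foldl (fun nl p => PySem.List.pySetD nl p.1 ("#### " ++ p.2 ++ "\n")) (pvApply d s)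
      = pvApply (pats.foldl (fun d p => d.insert p.1 ("#### " ++ p.2 ++ "\n")) d) s := by
  induction pats generalizing d with
  | nil => rfl
  | cons p rest ih =>
    obtain ⟨hp0, hp1⟩ := hp p (by simp)
    simp only [List.foldl_cons]
    rw [PySem.List.pySetD_of_nonneg _ _ hp0, ← pvApply_insert d s _ hp0 hp1]
    exact ih _ (fun q hq => hp q (by simp [hq]))

theorem pv_outer (s : List String) (shl : List (String × Int))
    (sp : List (String × List (Int × String))) (d : PySem.Dict Int String)
    (hpre : ∀ sec ∈ sp,
      ((PySem.Dict.mk shl).contains sec.1 = true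
        ∧ 0 ≤ (PySem.Dict.mk shl).getD sec.1 0
        ∧ (PySem.Dict.mk shl).getD sec.1 0 < (s.length : Int))
      ∧ ∀ p ∈ sec.2, 0 ≤ p.1 ∧ p.1 < (s.length : Int)) :
    sp.foldl (fun new_lines sec =>
      match (PySem.Dict.mk shl).get? sec.1 with
      | none => new_lines
      | some header_line =>
        sec.2.foldl (fun nl p => PySem.List.pySetD nl p.1 ("#### " ++ p.2 ++ "\n"))
          (PySem.List.pySetD new_lines header_line ("### " ++ sec.1 ++ " SEVERITY\n"))) (pvApply d s)
      = pvApply (sp.foldl (fun d sec =>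
          match (PySem.Dict.mk shl).get? sec.1 with
          | none => d
          | some h =>
            sec.2.foldl (fun d p => d.insert p.1 ("#### " ++ p.2 ++ "\n"))
              (d.insert h ("### " ++ sec.1 ++ " SEVERITY\n"))) d) s := by
  induction sp generalizing d with
  | nil => rfl
  | cons sec rest ih =>
    obtain ⟨⟨hc, hh0, hh1⟩, hpats⟩ := hpre sec (by simp)
    obtain ⟨h, hh⟩ : ∃ h, (PySem.Dict.mk shl).get? sec.1 = some h := by
      rw [PySem.Dict.contains_eq_isSome_get?] at hc
      exact Option.isSome_iff_exists.mp hc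
    rw [PySem.Dict.getD_eq_get?_getD, hh] at hh0 hh1
    simp only [Option.getD_some] at hh0 hh1
    simp only [List.foldl_cons, hh]
    rw [PySem.List.pySetD_of_nonneg _ _ hh0, ← pvApply_insert d s _ hh0 hh1,
      pv_inner s sec.2 _ hpats]
    exact ih _ (fun q hq => hpre q (by simp [hq]))

-- B-side facts ---------------------------------------------------------------

theorem pv_fst_enum (xs : List String) : ∀ (s : Int) (p : Int × String),
    p ∈ PySem.List.enumerate xs s → s ≤ p.1 := by
  induction xs with
  | nil => intro s p hp; simp [PySem.List.enumerate_nil] at hp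
  | cons x xs ih =>
    intro s p hp
    rw [PySem.List.enumerate_cons] at hp
    rcases List.mem_cons.mp hp with hp | hp
    · simp [hp]
    · have := ih (s + 1) p hp; omega

theorem pvLkp_dropWhile (es : List (Int × String)) (i q : Int) (hq : i ≤ q) :
    pvLkp (es.dropWhile (fun e => decide (e.1 < i))) q = pvLkp es q := by
  induction es with
  | nil => rfl
  | cons e r ih =>
    obtain ⟨k, v⟩ := e
    by_cases hk : k < i
    · rw [List.dropWhile_cons_of_pos (by simpa using hk), ih]
      have : ¬ k = q := by omega
      simp [pvLkp, this]
    · rw [List.dropWhile_cons_of_neg (by simpa using hk)]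

theorem pvLkp_none (es : List (Int × String)) (q : Int) (h : ∀ e ∈ es, e.1 ≠ q) :
    pvLkp es q = none := by
  induction es with
  | nil => rfl
  | cons e r ih =>
    obtain ⟨k, v⟩ := e
    have hk : ¬ k = q := h (k, v) (by simp)
    simp only [pvLkp, if_neg hk]
    exact ih (fun e he => h e (by simp [he]))

theorem pvLkp_some (es : List (Int × String)) (k : Int) (v : String)
    (hnd : (es.map (·.1)).Nodup) (hm : (k, v) ∈ es) : pvLkp es k = some v := by
  induction es with
  | nil => simp at hm
  | cons e r ih =>
    obtain ⟨k', v'⟩ := e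
    rw [List.map_cons, List.nodup_cons] at hnd
    rcases List.mem_cons.mp hm with hm | hm
    · obtain ⟨rfl, rfl⟩ := Prod.mk.inj hm.symm
      simp [pvLkp]
    · have hne : ¬ k' = k := by
        intro rfl
        exact hnd.1 (by simpa using List.mem_map_of_mem (f := (·.1)) hm)
      simp only [pvLkp, if_neg hne]
      exact ih hnd.2 hm

-- the merge sweep over strictly key-increasing edits is the pointwise lookup pass
theorem pv_merge (s : List String) : ∀ (i : Int) (es : List (Int × String)),
    es.Pairwise (fun a b => a.1 < b.1) →
    pvMergeEdits i es s
      = (PySem.List.enumerate s i).map (fun p => (pvLkp es p.1).getD p.2) := by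
  induction s with
  | nil => intro i es _; simp [pvMergeEdits, PySem.List.enumerate_nil]
  | cons l ls ih =>
    intro i es hpw
    rw [PySem.List.enumerate_cons, List.map_cons]
    have hes' : (es.dropWhile (fun e => decide (e.1 < i))).Pairwise (fun a b => a.1 < b.1) :=
      hpw.sublist (List.dropWhile_sublist _)
    show (match es.dropWhile (fun e => decide (e.1 < i)) with
      | [] => l :: pvMergeEdits (i + 1) [] ls
      | (p, t) :: rest =>
        if p = i then t :: pvMergeEdits (i + 1) rest ls
        else l :: pvMergeEdits (i + 1) ((p, t) :: rest) ls) = _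
    cases hcase : es.dropWhile (fun e => decide (e.1 < i)) with
    | nil =>
      have h0 : pvLkp es i = none := by
        rw [← pvLkp_dropWhile es i i le_rfl, hcase]; rfl
      rw [h0]
      refine congrArg (l :: ·) ?_
      rw [ih (i + 1) [] (by constructor)]
      refine List.map_congr_left (fun p hp => ?_)
      have hpi : i + 1 ≤ p.1 := pv_fst_enum ls (i + 1) p hp
      rw [← pvLkp_dropWhile es i p.1 (by omega), hcase]
    | cons pt rest =>
      obtain ⟨p, t⟩ := pt
      show (if p = i then t :: pvMergeEdits (i + 1) rest ls
        else l :: pvMergeEdits (i + 1) ((p, t) :: rest) ls) = _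
      have hpge : ¬ p < i := by
        have := List.head?_dropWhile_not (fun e => decide (e.1 < i)) es
        rw [hcase] at this; simpa using this
      have hrest : ∀ b ∈ rest, p < b.1 := by
        rw [hcase] at hes'
        exact fun b hb => (List.pairwise_cons.mp hes').1 b hb
      have hlkp : ∀ q, i ≤ q → pvLkp es q = if p = q then some t else pvLkp rest q := by
        intro q hq
        rw [← pvLkp_dropWhile es i q hq, hcase]; rfl
      by_cases hpi : p = i
      · subst hpi
        rw [if_pos rfl, hlkp p le_rfl, if_pos rfl]
        refine congrArg (t :: ·) ?_
        rw [ih (p + 1) rest (by rw [hcase] at hes'; exact hes'.of_cons)]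
        refine List.map_congr_left (fun q hq => ?_)
        have hq1 : p + 1 ≤ q.1 := pv_fst_enum ls (p + 1) q hq
        rw [hlkp q.1 (by omega), if_neg (by omega)]
      · rw [if_neg hpi]
        have h0 : pvLkp es i = none := by
          rw [hlkp i le_rfl, if_neg hpi]
          exact pvLkp_none rest i (fun e he => by have := hrest e he; omega)
        rw [h0]
        refine congrArg (l :: ·) ?_
        rw [ih (i + 1) ((p, t) :: rest) (by rw [hcase] at hes'; exact hes')]
        refine List.map_congr_left (fun q hq => ?_)
        have hq1 : i + 1 ≤ q.1 := pv_fst_enum ls (i + 1) q hq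
        rw [← pvLkp_dropWhile es i q.1 (by omega), hcase]

theorem pvLkp_sorted_get (d : PySem.Dict Int String) (hnd : d.keys.Nodup) (k : Int) :
    pvLkp (PySem.List.sorted d.items (fun e => e.1) false) k = d.get? k := by
  have hperm : (PySem.List.sorted d.items (fun e => e.1) false).Perm d.items :=
    PySem.List.sorted_perm d.items (fun e => e.1) false
  have hkeys : ((PySem.List.sorted d.items (fun e => e.1) false).map (·.1)).Perm d.keys := by
    simpa [PySem.Dict.keys] using hperm.map (·.1)
  have hnd' : ((PySem.List.sorted d.items (fun e => e.1) false).map (·.1)).Nodup :=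
    hkeys.nodup_iff.mpr hnd
  cases hk : d.get? k with
  | some v =>
    exact pvLkp_some _ k v hnd'
      (hperm.mem_iff.mpr (PySem.Dict.mem_items_of_get?_eq_some d hk))
  | none =>
    refine pvLkp_none _ k (fun e he hek => ?_)
    have : k ∈ d.keys := hkeys.subset (hek ▸ List.mem_map_of_mem (f := (·.1)) he)
    exact ((PySem.Dict.get?_eq_none_iff_not_mem_keys d k).mp hk) this

theorem pv_sorted_pairwise_lt (d : PySem.Dict Int String) (hnd : d.keys.Nodup) :
    (PySem.List.sorted d.items (fun e => e.1) false).Pairwise (fun a b => a.1 < b.1) := by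
  have hle : (PySem.List.sorted d.items (fun e => e.1) false).Pairwise
      (fun a b => a.1 ≤ b.1) := PySem.List.sorted_pairwise d.items (fun e => e.1)
  have hnd' : ((PySem.List.sorted d.items (fun e => e.1) false).map (·.1)).Nodup := by
    have hkeys := (PySem.List.sorted_perm d.items (fun e => e.1) false).map (·.1)
    exact (hkeys.nodup_iff).mpr (by simpa [PySem.Dict.keys] using hnd)
  rw [List.Nodup, List.pairwise_map] at hnd'
  exact (hle.and hnd').imp (fun h => lt_of_le_of_ne h.1 h.2)

theorem pv_nodup_keys (shl : List (String × Int)) (sp : List (String × List (Int × String)))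
    (d : PySem.Dict Int String) (hd : d.keys.Nodup) :
    (sp.foldl (fun d sec =>
      match (PySem.Dict.mk shl).get? sec.1 with
      | none => d
      | some h =>
        sec.2.foldl (fun d p => d.insert p.1 ("#### " ++ p.2 ++ "\n"))
          (d.insert h ("### " ++ sec.1 ++ " SEVERITY\n"))) d).keys.Nodup := by
  induction sp generalizing d with
  | nil => exact hd
  | cons sec rest ih =>
    simp only [List.foldl_cons]
    cases (PySem.Dict.mk shl).get? sec.1 with
    | none => exact ih d hd
    | some h =>
      refine ih _ ?_
      exact PySem.Dict.nodup_keys_foldl_insert_key sec.2 (·.1) _ _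
        (PySem.Dict.nodup_keys_insert _ _ _ hd)

-- dict(edit_stream(...)) is A's per-section insert fold
theorem pv_dict_eq (shl : List (String × Int)) (sp : List (String × List (Int × String))) :
    PySem.Dict.ofList (pvEditStream sp shl)
      = sp.foldl (fun d sec =>
          match (PySem.Dict.mk shl).get? sec.1 with
          | none => d
          | some h =>
            sec.2.foldl (fun d p => d.insert p.1 ("#### " ++ p.2 ++ "\n"))
              (d.insert h ("### " ++ sec.1 ++ " SEVERITY\n"))) PySem.Dict.empty := by
  show (pvEditStream sp shl).foldl (fun d p => d.insert p.1 p.2) PySem.Dict.empty = _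
  unfold pvEditStream
  rw [List.foldl_flatMap]
  refine congrFun (congrFun (congrArg List.foldl (funext fun d => funext fun sec => ?_)) _) _
  cases (PySem.Dict.mk shl).get? sec.1 with
  | none => rfl
  | some h => simp [List.foldl_map]

-- ===== VERDICT (by name: the statement is the Claim_ definition above) =====
theorem remove_numbering_py_spec : Claim_unchanged_remove_numbering_py := by
  intro lines sp shl _hdom hpre
  unfold Spec_remove_numbering_py
  intro hnd
  unfold D_remove_numbering_py at hnd
  push_neg at hnd
  have hyps : ∀ sec ∈ sp,
      ((PySem.Dict.mk shl).contains sec.1 = true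
        ∧ 0 ≤ (PySem.Dict.mk shl).getD sec.1 0
        ∧ (PySem.Dict.mk shl).getD sec.1 0 < (lines.length : Int))
      ∧ ∀ p ∈ sec.2, 0 ≤ p.1 ∧ p.1 < (lines.length : Int) := by
    intro sec hsec
    obtain ⟨⟨hc, hir⟩, hpats⟩ := hpre sec hsec
    obtain ⟨hneg, hpneg⟩ := hnd sec hsec
    exact ⟨⟨hc, by omega, hir.2⟩,
      fun p hp => ⟨by have := hpneg p hp; omega, (hpats p hp).2⟩⟩
  unfold remove_numbering_py remove_numbering_py_alt
  conv_lhs => rw [show lines = pvApply PySem.Dict.empty lines from (pvApply_empty lines).symm]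
  rw [pv_outer lines shl sp PySem.Dict.empty hyps]
  rw [pv_dict_eq shl sp]
  have hndk := pv_nodup_keys shl sp PySem.Dict.empty PySem.Dict.nodup_keys_empty
  rw [pv_merge lines 0 _ (pv_sorted_pairwise_lt _ hndk)]
  simp only [pvApply]
  refine List.map_congr_left (fun p _ => ?_)
  rw [pvLkp_sorted_get _ hndk, PySem.Dict.getD_eq_get?_getD]

theorem remove_numbering_py_changed : Claim_changed_remove_numbering_py := by
  unfold Claim_changed_remove_numbering_py; decide
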